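-- pv_equiv track=rewrite | github.com/BonCloudboy/tower-defense-benchmark | tower_defense.py | generate_waves
-- ===== SOURCE A (Python) =====
-- from typing import List, Tuple, Dict
--
-- ENEMY_TYPE_STATS = {
--     "Basic":   {"health": 15, "speed": 1, "reward": 5},
--     "Fast":    {"health": 12, "speed": 2, "reward": 6},
--     "Tank":    {"health": 40, "speed": 1, "reward": 10},
--     "Armored": {"health": 25, "speed": 1, "reward": 7},
--     "Flying":  {"health": 10, "speed": 3, "reward": 8}
-- }
--
-- def generate_waves(num_waves: int) -> List[List[Tuple[str, int, int, int]]]: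
--     """
--     Generate a list of waves with various enemy types,
--     each wave is a list of (enemy_type, health, speed, reward).
--     We'll escalate difficulty more quickly.
--     """
--     all_waves = []
--     for i in range(num_waves):
--         wave_enemies = []
--
--         # Basic enemies scale
--         basic_count = 3 + (i * 2)
--         basic_health = ENEMY_TYPE_STATS["Basic"]["health"] + i * 4
--         basic_speed  = ENEMY_TYPE_STATS["Basic"]["speed"] + (i // 3)
--         basic_reward = ENEMY_TYPE_STATS["Basic"]["reward"] + (i // 3)
--         for _ in range(basic_count):
--             wave_enemies.append(("Basic", basic_health, basic_speed, basic_reward))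
--
--         # Fast enemies (start from wave 1)
--         if i >= 1:
--             fast_count  = 1 + (i // 2)
--             fast_health = ENEMY_TYPE_STATS["Fast"]["health"] + i * 2
--             fast_speed  = ENEMY_TYPE_STATS["Fast"]["speed"] + (i // 4)
--             fast_reward = ENEMY_TYPE_STATS["Fast"]["reward"] + (i // 2)
--             for _ in range(fast_count):
--                 wave_enemies.append(("Fast", fast_health, fast_speed, fast_reward))
--
--         # Tank enemies (start from wave 2)
--         if i >= 2:
--             tank_count  = 1 + (i // 3)
--             tank_health = ENEMY_TYPE_STATS["Tank"]["health"] + i * 8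
--             tank_speed  = ENEMY_TYPE_STATS["Tank"]["speed"] + (i // 5)
--             tank_reward = ENEMY_TYPE_STATS["Tank"]["reward"] + (i // 3)
--             for _ in range(tank_count):
--                 wave_enemies.append(("Tank", tank_health, tank_speed, tank_reward))
--
--         # Armored enemies (start from wave 3)
--         if i >= 3:
--             armored_count  = 1 + (i // 3)
--             armored_health = ENEMY_TYPE_STATS["Armored"]["health"] + i * 5
--             armored_speed  = ENEMY_TYPE_STATS["Armored"]["speed"] + (i // 6)
--             armored_reward = ENEMY_TYPE_STATS["Armored"]["reward"] + (i // 3)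
--             for _ in range(armored_count):
--                 wave_enemies.append(("Armored", armored_health, armored_speed, armored_reward))
--
--         # Flying enemies (start from wave 4)
--         if i >= 4:
--             flying_count  = 1 + (i // 4)
--             flying_health = ENEMY_TYPE_STATS["Flying"]["health"] + i * 2
--             flying_speed  = ENEMY_TYPE_STATS["Flying"]["speed"] + (i // 6)
--             flying_reward = ENEMY_TYPE_STATS["Flying"]["reward"] + (i // 3)
--             for _ in range(flying_count):
--                 wave_enemies.append(("Flying", flying_health, flying_speed, flying_reward))
--
--         all_waves.append(wave_enemies)
--
--     return all_waves
-- ===== SOURCE B (Python) =====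
-- # Column-major (transposed) construction: build each enemy type's per-wave segment
-- # list across all waves first, then merge the five columns wave-by-wave with zip.
-- def _column(num_waves, name, start, count, health, speed, reward):
--     """Per-wave segment contributed by one enemy type, indexed by wave number."""
--     return [[(name, health(i), speed(i), reward(i))] * count(i) if i >= start else []
--             for i in range(num_waves)]
--
-- def generate_waves(num_waves):
--     basic   = _column(num_waves, "Basic",   0, lambda i: 3 + 2 * i,  lambda i: 15 + 4 * i, lambda i: 1 + i // 3, lambda i: 5 + i // 3)
--     fast    = _column(num_waves, "Fast",    1, lambda i: 1 + i // 2, lambda i: 12 + 2 * i, lambda i: 2 + i // 4, lambda i: 6 + i // 2)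
--     tank    = _column(num_waves, "Tank",    2, lambda i: 1 + i // 3, lambda i: 40 + 8 * i, lambda i: 1 + i // 5, lambda i: 10 + i // 3)
--     armored = _column(num_waves, "Armored", 3, lambda i: 1 + i // 3, lambda i: 25 + 5 * i, lambda i: 1 + i // 6, lambda i: 7 + i // 3)
--     flying  = _column(num_waves, "Flying",  4, lambda i: 1 + i // 4, lambda i: 10 + 2 * i, lambda i: 3 + i // 6, lambda i: 8 + i // 3)
--     return [b + f + t + a + fl for b, f, t, a, fl in zip(basic, fast, tank, armored, flying)]
-- ===== Notes on version B (the rewrite author's own statement) =====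
-- stated objective: alternative
-- what changed: Column-major construction: instead of A's wave-major loop with five inline per-type blocks, B builds for each enemy type a complete per-wave segment list across all waves (five staged passes) and then merges the five columns wave-by-wave with zip.
import Mathlib
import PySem

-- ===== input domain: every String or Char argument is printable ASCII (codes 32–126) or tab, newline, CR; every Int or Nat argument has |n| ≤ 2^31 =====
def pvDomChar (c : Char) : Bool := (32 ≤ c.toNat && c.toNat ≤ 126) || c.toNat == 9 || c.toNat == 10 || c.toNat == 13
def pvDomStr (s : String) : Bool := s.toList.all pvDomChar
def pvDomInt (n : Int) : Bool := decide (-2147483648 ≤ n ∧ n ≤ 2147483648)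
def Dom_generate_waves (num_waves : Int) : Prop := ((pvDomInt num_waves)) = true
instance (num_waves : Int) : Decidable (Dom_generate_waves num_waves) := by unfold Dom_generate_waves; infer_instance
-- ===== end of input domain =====

-- B builds each enemy type's per-wave segment list across all waves (column-major, five
-- staged passes) and merges the columns wave-by-wave with zip (objective: alternative; same cost).

-- ===== PORT A =====
-- module constant ENEMY_TYPE_STATS (dict of dicts); lookups use getD with a dummy default,
-- exact here because every key used by A is present.
def ENEMY_TYPE_STATS : PySem.Dict String (PySem.Dict String Int) :=
  PySem.Dict.ofList
    [ ("Basic",   PySem.Dict.ofList [("health", 15), ("speed", 1), ("reward", 5)]),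
      ("Fast",    PySem.Dict.ofList [("health", 12), ("speed", 2), ("reward", 6)]),
      ("Tank",    PySem.Dict.ofList [("health", 40), ("speed", 1), ("reward", 10)]),
      ("Armored", PySem.Dict.ofList [("health", 25), ("speed", 1), ("reward", 7)]),
      ("Flying",  PySem.Dict.ofList [("health", 10), ("speed", 3), ("reward", 8)]) ]

def pvStat (ty field : String) : Int :=
  (ENEMY_TYPE_STATS.getD ty PySem.Dict.empty).getD field 0

-- body of A's outer loop for wave index i
def pvWaveA (i : Int) : List (String × Int × Int × Int) :=
  let wave0 : List (String × Int × Int × Int) := []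
  -- Basic enemies scale
  let basic_count := 3 + i * 2
  let basic_health := pvStat "Basic" "health" + i * 4
  let basic_speed := pvStat "Basic" "speed" + PySem.Int.floordiv i 3
  let basic_reward := pvStat "Basic" "reward" + PySem.Int.floordiv i 3
  let wave1 := (PySem.List.pyRange 0 basic_count 1).foldl
    (fun acc _ => acc ++ [("Basic", basic_health, basic_speed, basic_reward)]) wave0
  -- Fast enemies (start from wave 1)
  let wave2 :=
    if i ≥ 1 then
      let fast_count := 1 + PySem.Int.floordiv i 2
      let fast_health := pvStat "Fast" "health" + i * 2
      let fast_speed := pvStat "Fast" "speed" + PySem.Int.floordiv i 4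
      let fast_reward := pvStat "Fast" "reward" + PySem.Int.floordiv i 2
      (PySem.List.pyRange 0 fast_count 1).foldl
        (fun acc _ => acc ++ [("Fast", fast_health, fast_speed, fast_reward)]) wave1
    else wave1
  -- Tank enemies (start from wave 2)
  let wave3 :=
    if i ≥ 2 then
      let tank_count := 1 + PySem.Int.floordiv i 3
      let tank_health := pvStat "Tank" "health" + i * 8
      let tank_speed := pvStat "Tank" "speed" + PySem.Int.floordiv i 5
      let tank_reward := pvStat "Tank" "reward" + PySem.Int.floordiv i 3
      (PySem.List.pyRange 0 tank_count 1).foldl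
        (fun acc _ => acc ++ [("Tank", tank_health, tank_speed, tank_reward)]) wave2
    else wave2
  -- Armored enemies (start from wave 3)
  let wave4 :=
    if i ≥ 3 then
      let armored_count := 1 + PySem.Int.floordiv i 3
      let armored_health := pvStat "Armored" "health" + i * 5
      let armored_speed := pvStat "Armored" "speed" + PySem.Int.floordiv i 6
      let armored_reward := pvStat "Armored" "reward" + PySem.Int.floordiv i 3
      (PySem.List.pyRange 0 armored_count 1).foldl
        (fun acc _ => acc ++ [("Armored", armored_health, armored_speed, armored_reward)]) wave3
    else wave3
  -- Flying enemies (start from wave 4)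
  let wave5 :=
    if i ≥ 4 then
      let flying_count := 1 + PySem.Int.floordiv i 4
      let flying_health := pvStat "Flying" "health" + i * 2
      let flying_speed := pvStat "Flying" "speed" + PySem.Int.floordiv i 6
      let flying_reward := pvStat "Flying" "reward" + PySem.Int.floordiv i 3
      (PySem.List.pyRange 0 flying_count 1).foldl
        (fun acc _ => acc ++ [("Flying", flying_health, flying_speed, flying_reward)]) wave4
    else wave4
  wave5

def generate_waves (num_waves : Int) : List (List (String × Int × Int × Int)) :=
  (PySem.List.pyRange 0 num_waves 1).foldl (fun acc i => acc ++ [pvWaveA i]) []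

-- ===== PORT B =====
-- one enemy type's per-wave segment, indexed by wave number (Source B's _column)
def pvColumn (num_waves : Int) (name : String) (start : Int)
    (count health speed reward : Int → Int) : List (List (String × Int × Int × Int)) :=
  (PySem.List.pyRange 0 num_waves 1).map (fun i =>
    if i ≥ start then PySem.List.pyRepeat [(name, health i, speed i, reward i)] (count i)
    else [])

def generate_waves_alt (num_waves : Int) : List (List (String × Int × Int × Int)) :=
  let basic   := pvColumn num_waves "Basic"   0 (fun i => 3 + 2*i) (fun i => 15 + 4*i)
                   (fun i => 1 + PySem.Int.floordiv i 3) (fun i => 5 + PySem.Int.floordiv i 3)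
  let fast    := pvColumn num_waves "Fast"    1 (fun i => 1 + PySem.Int.floordiv i 2) (fun i => 12 + 2*i)
                   (fun i => 2 + PySem.Int.floordiv i 4) (fun i => 6 + PySem.Int.floordiv i 2)
  let tank    := pvColumn num_waves "Tank"    2 (fun i => 1 + PySem.Int.floordiv i 3) (fun i => 40 + 8*i)
                   (fun i => 1 + PySem.Int.floordiv i 5) (fun i => 10 + PySem.Int.floordiv i 3)
  let armored := pvColumn num_waves "Armored" 3 (fun i => 1 + PySem.Int.floordiv i 3) (fun i => 25 + 5*i)
                   (fun i => 1 + PySem.Int.floordiv i 6) (fun i => 7 + PySem.Int.floordiv i 3)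
  let flying  := pvColumn num_waves "Flying"  4 (fun i => 1 + PySem.Int.floordiv i 4) (fun i => 10 + 2*i)
                   (fun i => 3 + PySem.Int.floordiv i 6) (fun i => 8 + PySem.Int.floordiv i 3)
  -- zip(*cols) with b + f + t + a + fl per wave
  List.zipWith (fun b r => b ++ r) basic
    (List.zipWith (fun f r => f ++ r) fast
      (List.zipWith (fun t r => t ++ r) tank
        (List.zipWith (fun a r => a ++ r) armored flying)))

-- ===== PRECONDITION & SPEC =====
def Spec_generate_waves (num_waves : Int) (out : List (List (String × Int × Int × Int))) : Prop := out = generate_waves_alt num_waves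
instance (num_waves : Int) (out : List (List (String × Int × Int × Int))) : Decidable (Spec_generate_waves num_waves out) := by unfold Spec_generate_waves; infer_instance

-- ===== CLAIM (what is proved, stated in full; the proofs are below) =====
def Claim_equal_generate_waves : Prop := ∀ (num_waves : Int), Dom_generate_waves num_waves → Spec_generate_waves num_waves (generate_waves num_waves)

-- ===== LEMMAS AND PROOFS =====

-- the constant-append loop over range(c) appends c.toNat copies
theorem pvLoop_eq (acc : List (String × Int × Int × Int)) (c : Int)
    (x : String × Int × Int × Int) :
    (PySem.List.pyRange 0 c 1).foldl (fun acc _ => acc ++ [x]) acc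
      = acc ++ List.replicate c.toNat x := by
  rw [PySem.List.foldl_append_singleton_eq_map]
  simp [List.map_const', PySem.List.length_pyRange_one]

-- zipping two maps of the same index list is a map of the combined function
theorem pvZipWith_map_same {α β γ δ : Type} (f : β → γ → δ) (g : α → β) (h : α → γ)
    (l : List α) :
    List.zipWith f (l.map g) (l.map h) = l.map (fun x => f (g x) (h x)) := by
  induction l with
  | nil => rfl
  | cons a t ih => simp [ih]

-- per-wave agreement: A's wave body equals the concatenation of B's five column entries
theorem pvWave_eq (i : Int) (hi : 0 ≤ i) :
    pvWaveA i
      = (if i ≥ 0 then PySem.List.pyRepeat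
            [("Basic", 15 + 4*i, 1 + PySem.Int.floordiv i 3, 5 + PySem.Int.floordiv i 3)] (3 + 2*i) else []) ++
        ((if i ≥ 1 then PySem.List.pyRepeat
            [("Fast", 12 + 2*i, 2 + PySem.Int.floordiv i 4, 6 + PySem.Int.floordiv i 2)] (1 + PySem.Int.floordiv i 2) else []) ++
         ((if i ≥ 2 then PySem.List.pyRepeat
            [("Tank", 40 + 8*i, 1 + PySem.Int.floordiv i 5, 10 + PySem.Int.floordiv i 3)] (1 + PySem.Int.floordiv i 3) else []) ++
          ((if i ≥ 3 then PySem.List.pyRepeat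
            [("Armored", 25 + 5*i, 1 + PySem.Int.floordiv i 6, 7 + PySem.Int.floordiv i 3)] (1 + PySem.Int.floordiv i 3) else []) ++
           (if i ≥ 4 then PySem.List.pyRepeat
            [("Flying", 10 + 2*i, 3 + PySem.Int.floordiv i 6, 8 + PySem.Int.floordiv i 3)] (1 + PySem.Int.floordiv i 4) else [])))) := by
  have s1 : pvStat "Basic" "health" = 15 := by decide
  have s2 : pvStat "Basic" "speed" = 1 := by decide
  have s3 : pvStat "Basic" "reward" = 5 := by decide
  have s4 : pvStat "Fast" "health" = 12 := by decide
  have s5 : pvStat "Fast" "speed" = 2 := by decide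
  have s6 : pvStat "Fast" "reward" = 6 := by decide
  have s7 : pvStat "Tank" "health" = 40 := by decide
  have s8 : pvStat "Tank" "speed" = 1 := by decide
  have s9 : pvStat "Tank" "reward" = 10 := by decide
  have s10 : pvStat "Armored" "health" = 25 := by decide
  have s11 : pvStat "Armored" "speed" = 1 := by decide
  have s12 : pvStat "Armored" "reward" = 7 := by decide
  have s13 : pvStat "Flying" "health" = 10 := by decide
  have s14 : pvStat "Flying" "speed" = 3 := by decide
  have s15 : pvStat "Flying" "reward" = 8 := by decide
  have hh : ∀ m : Int, i * m = m * i := fun m => by ring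
  simp only [pvWaveA, pvLoop_eq, PySem.List.pyRepeat_singleton, List.nil_append,
    s1, s2, s3, s4, s5, s6, s7, s8, s9, s10, s11, s12, s13, s14, s15, hh, ge_iff_le]
  rw [if_pos hi]
  split_ifs <;> simp [List.append_assoc]

-- ===== VERDICT (by name: the statement is the Claim_ definition above) =====
theorem generate_waves_spec : Claim_equal_generate_waves := by
  intro n _
  show generate_waves n = generate_waves_alt n
  unfold generate_waves generate_waves_alt pvColumn
  rw [PySem.List.foldl_append_singleton_eq_map, List.nil_append]
  simp only [pvZipWith_map_same]
  apply List.map_congr_left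
  intro i hi
  exact pvWave_eq i (PySem.List.mem_pyRange_one.mp hi).1
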